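-- pv_equiv track=rewrite | github.com/gilad-rubin/hypergraph | src/hypergraph/runners/_execution.py | _generate_product_inputs
-- ===== SOURCE A (Python) =====
-- from typing import TYPE_CHECKING, Any, Iterator
--
-- def _generate_product_inputs(
--     mapped_values: dict[str, list],
--     broadcast_values: dict[str, Any],
-- ) -> Iterator[dict[str, Any]]:
--     """Generate inputs for product mode (cartesian product)."""
--     from itertools import product as iter_product
--
--     if not mapped_values:
--         yield dict(broadcast_values)
--         return
--
--     keys = list(mapped_values.keys())
--     value_lists = [mapped_values[k] for k in keys]
--
--     for combo in iter_product(*value_lists):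
--         yield {
--             **broadcast_values,
--             **dict(zip(keys, combo)),
--         }
-- ===== SOURCE B (Python) =====
-- def _generate_product_inputs(mapped_values, broadcast_values):
--     """Generate inputs for product mode (cartesian product), by recursion on keys."""
--     keys = list(mapped_values)
--
--     def rec(i, partial):
--         if i == len(keys):
--             yield {**broadcast_values, **dict(partial)}
--         else:
--             k = keys[i]
--             for v in mapped_values[k]:
--                 yield from rec(i + 1, partial + [(k, v)])
--
--     yield from rec(0, [])
-- ===== Notes on version B (the rewrite author's own statement) =====
-- stated objective: alternative
-- what changed: Replaces itertools.product plus per-combo zip/dict-merge with a recursive generator that extends a partial key/value assignment one key at a time, yielding at the base case.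
import Mathlib
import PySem

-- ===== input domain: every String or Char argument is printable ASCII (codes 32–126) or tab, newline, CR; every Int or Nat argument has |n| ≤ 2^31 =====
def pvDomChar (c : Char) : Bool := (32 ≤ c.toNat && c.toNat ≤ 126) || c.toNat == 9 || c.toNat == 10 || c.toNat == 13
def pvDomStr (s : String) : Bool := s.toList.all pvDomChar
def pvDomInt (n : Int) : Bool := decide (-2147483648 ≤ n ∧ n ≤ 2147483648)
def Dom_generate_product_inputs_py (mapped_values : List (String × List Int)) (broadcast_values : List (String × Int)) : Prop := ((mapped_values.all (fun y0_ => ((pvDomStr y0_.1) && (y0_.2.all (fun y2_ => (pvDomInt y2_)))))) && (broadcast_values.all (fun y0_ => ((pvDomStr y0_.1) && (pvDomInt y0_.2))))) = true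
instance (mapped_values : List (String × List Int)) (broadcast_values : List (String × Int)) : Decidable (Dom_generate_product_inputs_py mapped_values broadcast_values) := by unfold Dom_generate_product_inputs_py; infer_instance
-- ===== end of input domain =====

-- B replaces itertools.product with a recursive generator extending a partial key/value assignment; alternative decomposition, same results and order.


-- ===== PORT A =====
-- itertools.product(*value_lists): last factor varies fastest
def pyProduct : List (List Int) → List (List Int)
  | [] => [[]]
  | vs :: rest => vs.flatMap (fun v => (pyProduct rest).map (fun c => v :: c))

-- {**d.items-as-dict, **pairs} : unpacking merges by inserting each pair in order
def pvMerge (bvd : PySem.Dict String Int) (pairs : List (String × Int)) : PySem.Dict String Int :=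
  pairs.foldl (fun d p => d.insert p.1 p.2) bvd

def generate_product_inputs_py (mapped_values : List (String × List Int)) (broadcast_values : List (String × Int)) : List (List (String × Int)) :=
  let mvd := PySem.Dict.ofList mapped_values
  let bvd := PySem.Dict.ofList broadcast_values
  if mvd.items = [] then [bvd.items]
  else
    let keys := mvd.keys
    let value_lists := keys.map (fun k => mvd.getD k [])
    (pyProduct value_lists).map (fun combo => (pvMerge bvd (keys.zip combo)).items)

-- ===== PORT B =====
-- rec i partial: recursion on the remaining keys, extending the partial assignment list
def altGo (mvd : PySem.Dict String (List Int)) (bvd : PySem.Dict String Int) : List String → List (String × Int) → List (List (String × Int))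
  | [], part => [(part.foldl (fun d p => d.insert p.1 p.2) bvd).items]
  | k :: ks, part => (mvd.getD k []).flatMap (fun v => altGo mvd bvd ks (part ++ [(k, v)]))

def generate_product_inputs_py_alt (mapped_values : List (String × List Int)) (broadcast_values : List (String × Int)) : List (List (String × Int)) :=
  let mvd := PySem.Dict.ofList mapped_values
  altGo mvd (PySem.Dict.ofList broadcast_values) mvd.keys []

-- ===== PRECONDITION & SPEC =====
def Spec_generate_product_inputs_py (mapped_values : List (String × List Int)) (broadcast_values : List (String × Int)) (out : List (List (String × Int))) : Prop := out = generate_product_inputs_py_alt mapped_values broadcast_values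
instance (mapped_values : List (String × List Int)) (broadcast_values : List (String × Int)) (out : List (List (String × Int))) : Decidable (Spec_generate_product_inputs_py mapped_values broadcast_values out) := by unfold Spec_generate_product_inputs_py; infer_instance

-- ===== CLAIM (what is proved, stated in full; the proofs are below) =====
def Claim_equal_generate_product_inputs_py : Prop := ∀ (mapped_values : List (String × List Int)) (broadcast_values : List (String × Int)), Dom_generate_product_inputs_py mapped_values broadcast_values → Spec_generate_product_inputs_py mapped_values broadcast_values (generate_product_inputs_py mapped_values broadcast_values)

-- ===== LEMMAS AND PROOFS =====
theorem altGo_eq (mvd : PySem.Dict String (List Int)) (bvd : PySem.Dict String Int)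
    (ks : List String) (part : List (String × Int)) :
    altGo mvd bvd ks part =
      (pyProduct (ks.map (fun k => mvd.getD k []))).map
        (fun c => (pvMerge bvd (part ++ ks.zip c)).items) := by
  induction ks generalizing part with
  | nil => simp [altGo, pyProduct, pvMerge]
  | cons k ks ih =>
    simp only [altGo, List.map_cons, pyProduct, List.map_flatMap, List.map_map]
    refine List.flatMap_congr ?_
    intro v _
    rw [ih]
    refine List.map_congr_left ?_
    intro c _
    simp only [Function.comp, List.zip_cons_cons, List.append_assoc, List.singleton_append]

theorem keys_nil_of_items_nil (mvd : PySem.Dict String (List Int)) (h : mvd.items = []) :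
    mvd.keys = [] := by
  simp [PySem.Dict.keys, h]

-- ===== VERDICT (by name: the statement is the Claim_ definition above) =====
theorem generate_product_inputs_py_spec : Claim_equal_generate_product_inputs_py := by
  intro mv bv _
  unfold Spec_generate_product_inputs_py generate_product_inputs_py generate_product_inputs_py_alt
  simp only []
  by_cases h : (PySem.Dict.ofList mv).items = []
  · rw [if_pos h, altGo_eq]
    simp [keys_nil_of_items_nil _ h, pyProduct, pvMerge]
  · rw [if_neg h, altGo_eq]
    simp
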